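-- pv_equiv track=rewrite | github.com/rgb-lab/FACSPy | FACSPy/model/_annotators.py | _process_markers
-- ===== SOURCE A (Python) =====
-- from typing import Optional, Union, Literal
--
-- def _process_markers(
--                      markers: list[str]) -> dict[str, list[Optional[str]]]:
--     if not isinstance(markers, list):
--         markers = [markers]
--     marker_dict = {"up": [],
--                    "down": [],
--                    "lo": [],
--                    "int": [],
--                    "hi": []}
--     for marker in markers:
--         if marker.endswith('+'):
--             marker_dict["up"].append(marker.split("+")[0])
--         elif marker.endswith('-'):
--             marker_dict["down"].append(marker.split("-")[0])
--         elif marker.endswith('lo'):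
--             marker_dict["lo"].append(marker.split('lo')[0])
--         elif marker.endswith('int'):
--             marker_dict["int"].append(marker.split('int')[0])
--         elif marker.endswith('hi'):
--             marker_dict["hi"].append(marker.split('hi')[0])
--         else:
--             marker_dict["up"].append(marker)
--     return marker_dict
-- ===== SOURCE B (Python) =====
-- SUFFIXES = [('+', 'up'), ('-', 'down'), ('lo', 'lo'), ('int', 'int'), ('hi', 'hi')]
--
-- def _classify(marker):
--     for suffix, key in SUFFIXES:
--         if marker.endswith(suffix):
--             return key, marker.split(suffix)[0]
--     return 'up', marker
--
-- def _process_markers(markers):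
--     if not isinstance(markers, list):
--         markers = [markers]
--     pairs = [_classify(m) for m in markers]
--     return {key: [v for k, v in pairs if k == key]
--             for key in ('up', 'down', 'lo', 'int', 'hi')}
-- ===== Notes on version B (the rewrite author's own statement) =====
-- stated objective: idiomatic
-- what changed: Replaces the mutating if/elif chain over a shared dict with a pure classifier driven by an ordered suffix table plus a per-key grouping comprehension (five filters over the classified pairs) instead of one appending pass.
import Mathlib
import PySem

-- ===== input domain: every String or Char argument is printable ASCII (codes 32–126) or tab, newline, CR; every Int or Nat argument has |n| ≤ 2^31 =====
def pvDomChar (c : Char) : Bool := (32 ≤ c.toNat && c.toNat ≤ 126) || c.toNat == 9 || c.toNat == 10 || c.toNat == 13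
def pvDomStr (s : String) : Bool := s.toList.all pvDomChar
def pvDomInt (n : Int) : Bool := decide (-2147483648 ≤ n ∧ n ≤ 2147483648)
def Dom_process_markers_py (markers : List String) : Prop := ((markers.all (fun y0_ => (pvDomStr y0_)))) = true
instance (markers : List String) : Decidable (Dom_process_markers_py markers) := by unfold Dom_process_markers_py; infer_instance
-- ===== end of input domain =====

-- B replaces A's mutating if/elif chain by a suffix-table classifier and per-key grouping (idiomatic; no intended behaviour change).

-- ===== PORT A =====
-- marker.split(sep)[0] (sep nonempty, so split? = some and the result nonempty; the defaults are never used)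
def pvSplitFst (s sep : String) : String := ((PySem.Str.split? s sep).getD [s]).headD s

def process_markers_py (markers : List String) : List (String × List String) :=
  (markers.foldl (fun d m =>
      if PySem.Str.endswith m "+" then d.modify "up" [] (· ++ [pvSplitFst m "+"])
      else if PySem.Str.endswith m "-" then d.modify "down" [] (· ++ [pvSplitFst m "-"])
      else if PySem.Str.endswith m "lo" then d.modify "lo" [] (· ++ [pvSplitFst m "lo"])
      else if PySem.Str.endswith m "int" then d.modify "int" [] (· ++ [pvSplitFst m "int"])
      else if PySem.Str.endswith m "hi" then d.modify "hi" [] (· ++ [pvSplitFst m "hi"])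
      else d.modify "up" [] (· ++ [m]))
    (PySem.Dict.ofList [("up", []), ("down", []), ("lo", []), ("int", []), ("hi", [])])).items

-- ===== PORT B =====
def pvSuffixes : List (String × String) := [("+", "up"), ("-", "down"), ("lo", "lo"), ("int", "int"), ("hi", "hi")]

def pvClassify (m : String) : List (String × String) → String × String
  | [] => ("up", m)
  | (suffix, key) :: rest =>
      if PySem.Str.endswith m suffix then (key, pvSplitFst m suffix) else pvClassify m rest

def process_markers_py_alt (markers : List String) : List (String × List String) :=
  let pairs := markers.map (fun m => pvClassify m pvSuffixes)
  ["up", "down", "lo", "int", "hi"].map (fun key =>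
    (key, (pairs.filter (fun p => p.1 == key)).map (·.2)))

-- ===== PRECONDITION & SPEC =====
def Spec_process_markers_py (markers : List String) (out : List (String × List String)) : Prop := out = process_markers_py_alt markers
instance (markers : List String) (out : List (String × List String)) : Decidable (Spec_process_markers_py markers out) := by unfold Spec_process_markers_py; infer_instance

-- ===== CLAIM (what is proved, stated in full; the proofs are below) =====
def Claim_equal_process_markers_py : Prop := ∀ (markers : List String), Dom_process_markers_py markers → Spec_process_markers_py markers (process_markers_py markers)

-- ===== LEMMAS AND PROOFS =====
def pvSel (key : String) (ms : List String) : List String :=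
  ((ms.map (fun m => pvClassify m pvSuffixes)).filter (fun p => p.1 == key)).map (·.2)

theorem pvSel_cons (key m : String) (ms : List String) :
    pvSel key (m :: ms) = pvSel key [m] ++ pvSel key ms := by
  simp only [pvSel, List.map_cons, List.map_nil, List.filter_cons, List.filter_nil]
  split <;> simp

theorem pv_alt_eq (ms : List String) :
    process_markers_py_alt ms =
      [("up", pvSel "up" ms), ("down", pvSel "down" ms), ("lo", pvSel "lo" ms),
       ("int", pvSel "int" ms), ("hi", pvSel "hi" ms)] := by
  simp [process_markers_py_alt, pvSel]

theorem pv_step_items (m : String) (a b c d e : List String) :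
    (if PySem.Str.endswith m "+" then
        (PySem.Dict.mk [("up", a), ("down", b), ("lo", c), ("int", d), ("hi", e)]).modify "up" [] (· ++ [pvSplitFst m "+"])
      else if PySem.Str.endswith m "-" then
        (PySem.Dict.mk [("up", a), ("down", b), ("lo", c), ("int", d), ("hi", e)]).modify "down" [] (· ++ [pvSplitFst m "-"])
      else if PySem.Str.endswith m "lo" then
        (PySem.Dict.mk [("up", a), ("down", b), ("lo", c), ("int", d), ("hi", e)]).modify "lo" [] (· ++ [pvSplitFst m "lo"])
      else if PySem.Str.endswith m "int" then
        (PySem.Dict.mk [("up", a), ("down", b), ("lo", c), ("int", d), ("hi", e)]).modify "int" [] (· ++ [pvSplitFst m "int"])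
      else if PySem.Str.endswith m "hi" then
        (PySem.Dict.mk [("up", a), ("down", b), ("lo", c), ("int", d), ("hi", e)]).modify "hi" [] (· ++ [pvSplitFst m "hi"])
      else
        (PySem.Dict.mk [("up", a), ("down", b), ("lo", c), ("int", d), ("hi", e)]).modify "up" [] (· ++ [m])) =
    PySem.Dict.mk [("up", a ++ pvSel "up" [m]), ("down", b ++ pvSel "down" [m]),
      ("lo", c ++ pvSel "lo" [m]), ("int", d ++ pvSel "int" [m]), ("hi", e ++ pvSel "hi" [m])] := by
  split_ifs with h1 h2 h3 h4 h5 <;>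
    simp_all [pvSel, pvClassify, pvSuffixes,
      PySem.Dict.modify, PySem.Dict.insert, PySem.Dict.getD, PySem.Dict.get?, PySem.Dict.contains]
theorem pv_foldA (ms : List String) (a b c d e : List String) :
    ((ms.foldl (fun (d : PySem.Dict String (List String)) (m : String) =>
      if PySem.Str.endswith m "+" then d.modify "up" [] (· ++ [pvSplitFst m "+"])
      else if PySem.Str.endswith m "-" then d.modify "down" [] (· ++ [pvSplitFst m "-"])
      else if PySem.Str.endswith m "lo" then d.modify "lo" [] (· ++ [pvSplitFst m "lo"])
      else if PySem.Str.endswith m "int" then d.modify "int" [] (· ++ [pvSplitFst m "int"])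
      else if PySem.Str.endswith m "hi" then d.modify "hi" [] (· ++ [pvSplitFst m "hi"])
      else d.modify "up" [] (· ++ [m]))
      (PySem.Dict.mk [("up", a), ("down", b), ("lo", c), ("int", d), ("hi", e)])).items) =
    [("up", a ++ pvSel "up" ms), ("down", b ++ pvSel "down" ms), ("lo", c ++ pvSel "lo" ms),
     ("int", d ++ pvSel "int" ms), ("hi", e ++ pvSel "hi" ms)] := by
  induction ms generalizing a b c d e with
  | nil => simp [pvSel]
  | cons m ms ih =>
      rw [List.foldl_cons, pv_step_items, ih]
      rw [pvSel_cons "up" m ms, pvSel_cons "down" m ms, pvSel_cons "lo" m ms,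
        pvSel_cons "int" m ms, pvSel_cons "hi" m ms]
      simp [List.append_assoc]

-- ===== VERDICT (by name: the statement is the Claim_ definition above) =====
theorem process_markers_py_spec : Claim_equal_process_markers_py := by
  intro ms _
  unfold Spec_process_markers_py process_markers_py
  rw [pv_alt_eq]
  have h0 : PySem.Dict.ofList
      [(("up" : String), ([] : List String)), ("down", []), ("lo", []), ("int", []), ("hi", [])]
      = PySem.Dict.mk [("up", []), ("down", []), ("lo", []), ("int", []), ("hi", [])] := rfl
  rw [h0, pv_foldA]
  simp
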